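-- pv_equiv track=rewrite | github.com/DreamyDreamss/Algorithm_Study | log_resort.py | log_spliter
-- ===== SOURCE A (Python) =====
-- def log_spliter(logs) -> list:
-- 		letters, digits = [], []
-- 		for log in logs:
-- 				content = "".join(log.split()[1:])
-- 				if content.isdigit():
-- 						digits.append(log)
-- 				else:
-- 						letters.append(log)
--
-- 		letters.sort(key = lambda x: (x.split()[1:],x.split()[0]))
-- 		return digits + letters
-- ===== SOURCE B (Python) =====
-- def log_spliter(logs) -> list:
--     # One stable sort of the whole list: digit-logs get the minimal key [] (all
--     # equal, so stability keeps their original order and puts them first);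
--     # letter-logs get [rest, [first]], which list-compares exactly like A's
--     # (rest, first) tuple key.
--     def key(log):
--         parts = log.split()
--         rest = parts[1:]
--         if "".join(rest).isdigit():
--             return []
--         return [rest, [parts[0]]]
--     return sorted(logs, key=key)
-- ===== Notes on version B (the rewrite author's own statement) =====
-- stated objective: idiomatic
-- what changed: Replaces A's partition-into-two-lists-then-sort-the-letters with a single stable sorted(logs, key=...) call whose key sends digit-logs to a minimal constant key (stability keeps their order first) and letter-logs to [rest, [first]], which list-compares exactly like A's (rest, first) tuple.
import Mathlib
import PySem

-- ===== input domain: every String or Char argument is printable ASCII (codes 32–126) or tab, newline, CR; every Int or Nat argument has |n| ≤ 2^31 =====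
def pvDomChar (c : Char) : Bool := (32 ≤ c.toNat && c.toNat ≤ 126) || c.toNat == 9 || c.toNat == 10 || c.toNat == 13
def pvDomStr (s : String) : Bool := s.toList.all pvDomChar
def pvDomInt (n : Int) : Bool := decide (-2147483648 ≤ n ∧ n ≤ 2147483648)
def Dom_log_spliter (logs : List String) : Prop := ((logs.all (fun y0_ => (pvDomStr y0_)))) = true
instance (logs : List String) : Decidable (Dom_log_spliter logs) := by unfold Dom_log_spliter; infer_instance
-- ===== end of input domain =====

-- B replaces A's partition-then-sort-the-letters by ONE stable sort of the whole
-- list under a key that puts digit-logs first (idiomatic one-call form, same cost).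

-- ===== PORT A =====
-- 'x.split()[0]' raises IndexError when the split is empty; that input is excluded
-- by Pre_, so the port may return the default "" there (never reached inside Pre_).
def log_spliter (logs : List String) : List String :=
  let p := logs.foldl
    (fun (p : List String × List String) log =>
      let content := PySem.Str.join "" ((PySem.Str.split₀ log).drop 1)
      if PySem.Str.strIsdigit content then (p.1, p.2 ++ [log]) else (p.1 ++ [log], p.2))
    ([], [])
  p.2 ++ PySem.List.sorted2 p.1
    (fun x => (PySem.Str.split₀ x).drop 1)
    (fun x => (PySem.List.pyGet? (PySem.Str.split₀ x) 0).getD "")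

-- ===== PORT B =====
def log_spliter_alt (logs : List String) : List String :=
  PySem.List.sorted logs
    (fun log =>
      let parts := PySem.Str.split₀ log
      let rest := parts.drop 1
      if PySem.Str.strIsdigit (PySem.Str.join "" rest) then ([] : List (List String))
      else [rest, [(PySem.List.pyGet? parts 0).getD ""]])
    false

-- ===== PRECONDITION & SPEC =====
-- Pre_ excludes logs whose split() is empty (all-whitespace/empty strings): on those
-- Python A (and Python B) raise IndexError at 'parts[0]'.
def Pre_log_spliter (logs : List String) : Prop :=
  ∀ log ∈ logs, PySem.Str.split₀ log ≠ []
instance (logs : List String) : Decidable (Pre_log_spliter logs) := by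
  unfold Pre_log_spliter; infer_instance
def pvWitness_log_spliter : List String :=
  ["dig1 8 1 5 1", "let1 art can", "dig2 3 6", "let2 own kit dig", "let3 art zero"]
def Spec_log_spliter (logs : List String) (out : List String) : Prop := out = log_spliter_alt logs
instance (logs : List String) (out : List String) : Decidable (Spec_log_spliter logs out) := by unfold Spec_log_spliter; infer_instance

-- ===== CLAIM (what is proved, stated in full; the proofs are below) =====
def Claim_equal_log_spliter : Prop := ∀ (logs : List String), Dom_log_spliter logs → Pre_log_spliter logs → Spec_log_spliter logs (log_spliter logs)

-- ===== LEMMAS AND PROOFS =====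

-- the digit-log test both programs apply
def pvDig (log : String) : Bool :=
  PySem.Str.strIsdigit (PySem.Str.join "" ((PySem.Str.split₀ log).drop 1))

-- B's sort key
def pvKey (log : String) : List (List String) :=
  if pvDig log then []
  else [(PySem.Str.split₀ log).drop 1, [(PySem.List.pyGet? (PySem.Str.split₀ log) 0).getD ""]]

theorem pv_insertBy_congr {α : Type} (f g : α → α → Bool) (x : α) (ys : List α)
    (h : ∀ y ∈ ys, f x y = g x y) :
    PySem.List.insertBy f x ys = PySem.List.insertBy g x ys := by
  induction ys with
  | nil => rfl
  | cons y ys ih =>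
    have hy := h y (by simp)
    simp only [PySem.List.insertBy, hy]
    split
    · rfl
    · rw [ih (fun z hz => h z (by simp [hz]))]

theorem pv_insertBy_append_left {α : Type} (before : α → α → Bool) (x : α)
    (D S : List α) (h : ∀ d ∈ D, before x d = false) :
    PySem.List.insertBy before x (D ++ S) = D ++ PySem.List.insertBy before x S := by
  induction D with
  | nil => rfl
  | cons d D ih =>
    have hd := h d (by simp)
    simp only [List.cons_append, PySem.List.insertBy, hd]
    simp only [Bool.false_eq_true, if_false]
    rw [ih (fun z hz => h z (by simp [hz]))]

theorem pv_insertBy_front {α : Type} (before : α → α → Bool) (x : α) (S : List α)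
    (h : ∀ y ∈ S, before x y = true) :
    PySem.List.insertBy before x S = x :: S := by
  cases S with
  | nil => rfl
  | cons y ys => simp [PySem.List.insertBy, h y (by simp)]

-- the two letter-comparisons agree: B's 2-element-list key compares like A's tuple key
theorem pv_pair_lt (r1 r2 : List String) (h1 h2 : String) :
    (decide (([r1, [h1]] : List (List String)) < [r2, [h2]]))
      = (decide (r1 < r2) || (!(decide (r2 < r1)) && decide (h1 < h2))) := by
  by_cases h12 : r1 < r2
  · simp [h12, List.cons_lt_cons_iff]
  · by_cases h21 : r2 < r1
    · have hne : r1 ≠ r2 := fun he => h12 (he ▸ h21)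
      simp [h12, h21, List.cons_lt_cons_iff, hne]
    · have he : r1 = r2 := le_antisymm (not_lt.mp h21) (not_lt.mp h12)
      subst he
      by_cases hh : h1 < h2
      · simp [List.cons_lt_cons_iff, hh]
      · simp [List.cons_lt_cons_iff, hh]

theorem pv_key_lt_iff (x y : String) (hx : pvDig x = false) (hy : pvDig y = false) :
    (decide (pvKey x < pvKey y))
      = ((decide ((PySem.Str.split₀ x).drop 1 < (PySem.Str.split₀ y).drop 1))
         || (!(decide ((PySem.Str.split₀ y).drop 1 < (PySem.Str.split₀ x).drop 1))
             && decide ((PySem.List.pyGet? (PySem.Str.split₀ x) 0).getD ""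
                        < (PySem.List.pyGet? (PySem.Str.split₀ y) 0).getD ""))) := by
  simp only [pvKey, hx, hy, Bool.false_eq_true, if_false]
  exact pv_pair_lt _ _ _ _

-- main induction: digits ++ sorted-letters = one stable sort under pvKey
theorem pv_main (logs : List String) :
    logs.filter pvDig
      ++ PySem.List.sorted2 (logs.filter (fun x => !pvDig x))
           (fun x => (PySem.Str.split₀ x).drop 1)
           (fun x => (PySem.List.pyGet? (PySem.Str.split₀ x) 0).getD "")
      = PySem.List.sorted logs pvKey false := by
  induction logs using List.reverseRecOn with
  | nil => rfl
  | append_singleton l x ih =>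
    simp only [List.filter_append, List.filter_singleton]
    have hsorted : PySem.List.sorted (l ++ [x]) pvKey false
        = PySem.List.insertBy (fun a b => decide (pvKey a < pvKey b)) x
            (PySem.List.sorted l pvKey false) := by
      rw [PySem.List.sorted_eq_foldl_insertBy, PySem.List.sorted_eq_foldl_insertBy,
        List.foldl_append]
      rfl
    set k1 : String → List String := fun x => (PySem.Str.split₀ x).drop 1 with hk1
    set k2 : String → String := fun x => (PySem.List.pyGet? (PySem.Str.split₀ x) 0).getD "" with hk2
    have hsorted2 : ∀ (L : List String),
        PySem.List.sorted2 (L ++ [x]) k1 k2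
          = PySem.List.insertBy (fun a b =>
              (decide (k1 a < k1 b) || (!(decide (k1 b < k1 a)) && decide (k2 a < k2 b)))) x
            (PySem.List.sorted2 L k1 k2) := by
      intro L
      simp only [PySem.List.sorted2, List.foldl_append, List.foldl_cons, List.foldl_nil,
        Bool.false_eq_true, if_false]
    have hmemD : ∀ d ∈ l.filter pvDig, pvDig d = true := by
      intro d hd; exact (List.mem_filter.mp hd).2
    have hmemS : ∀ y ∈ PySem.List.sorted2 (l.filter (fun x => !pvDig x)) k1 k2,
        pvDig y = false := by
      intro y hy
      have hy' := (PySem.List.sorted2_perm (l.filter (fun x => !pvDig x)) k1 k2 false).subset hy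
      simpa using (List.mem_filter.mp hy').2
    by_cases hx : pvDig x = true
    · -- digit log: inserted right after the previous digits
      simp only [hx, Bool.not_true, cond_false, cond_true, List.append_nil]
      rw [hsorted, ← ih]
      rw [pv_insertBy_append_left _ x _ _ (by
        intro d hd
        have hxk : pvKey x = [] := by simp [pvKey, hx]
        have hdk : pvKey d = [] := by simp [pvKey, hmemD d hd]
        rw [hxk, hdk]
        exact decide_eq_false (List.not_lt_nil _))]
      rw [pv_insertBy_front _ x _ (by
        intro y hy
        have hky : pvKey x = [] := by simp [pvKey, hx]
        have hyl : pvDig y = false := hmemS y hy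
        have hkey : pvKey y = [k1 y, [k2 y]] := by simp [pvKey, hyl, hk1, hk2]
        rw [hky, hkey]
        exact decide_eq_true (List.nil_lt_cons _ _))]
      simp
    · -- letter log: inserted among the letters by the same comparison
      have hx' : pvDig x = false := by simpa using hx
      simp only [hx', Bool.not_false, cond_false, cond_true, List.append_nil]
      rw [hsorted, ← ih, hsorted2]
      rw [pv_insertBy_append_left _ x _ _ (by
        intro d hd
        have hdk : pvKey d = [] := by simp [pvKey, hmemD d hd]
        rw [hdk]
        exact decide_eq_false (List.not_lt_nil _))]
      exact congrArg (List.filter pvDig l ++ ·)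
        (pv_insertBy_congr _ _ x _ (fun y hy => (pv_key_lt_iff x y hx' (hmemS y hy)).symm))

-- ===== VERDICT (by name: the statement is the Claim_ definition above) =====
theorem log_spliter_spec : Claim_equal_log_spliter := by
  intro logs _ _
  unfold Spec_log_spliter log_spliter log_spliter_alt
  have hfold : logs.foldl
      (fun (p : List String × List String) log =>
        let content := PySem.Str.join "" ((PySem.Str.split₀ log).drop 1)
        if PySem.Str.strIsdigit content then (p.1, p.2 ++ [log]) else (p.1 ++ [log], p.2))
      ([], [])
      = (logs.filter (fun x => !pvDig x), logs.filter pvDig) := by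
    have hstep : (fun (p : List String × List String) log =>
        let content := PySem.Str.join "" ((PySem.Str.split₀ log).drop 1)
        if PySem.Str.strIsdigit content then (p.1, p.2 ++ [log]) else (p.1 ++ [log], p.2))
        = (fun (p : List String × List String) log =>
            (if pvDig log then p.1 else p.1 ++ [log],
             if pvDig log then p.2 ++ [log] else p.2)) := by
      funext p log
      simp only [pvDig]
      split <;> rfl
    rw [hstep, PySem.List.foldl_prod_mk
      (f := fun acc log => if pvDig log then acc else acc ++ [log])
      (g := fun acc log => if pvDig log then acc ++ [log] else acc)]
    simp only [Prod.mk.injEq]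
    refine ⟨?_, ?_⟩
    · have : (fun (acc : List String) log => if pvDig log then acc else acc ++ [log])
          = (fun (acc : List String) log => if !pvDig log then acc ++ [log] else acc) := by
        funext acc log; cases h : pvDig log <;> simp only [h, Bool.not_true, Bool.not_false,
          Bool.false_eq_true, if_false, if_true]
      rw [this, PySem.List.foldl_append_if_eq_filter]
      simp
    · rw [PySem.List.foldl_append_if_eq_filter]
      simp
  rw [hfold]
  exact pv_main logs
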